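-- pv_equiv track=rewrite | github.com/ckoons/BubbleSpacetimeTheory | play/toy_1656_cross_type_bsd_scan.py | chern_classes_type_IV
-- ===== SOURCE A (Python) =====
-- from math import comb
--
-- def chern_classes_type_IV(n):
--     """Chern classes of Q^n (compact dual of D_IV^n).
--     Q^n = SO(n+2)/[SO(n)xSO(2)] is the complex quadric.
--     c(Q^n) = (1+h)^{n+2} / (1+2h) mod h^{n+1}."""
--     g_n = n + 2
--     # (1+h)^{g_n} / (1+2h) = (1+h)^{g_n} * sum_{j>=0} (-2h)^j
--     chern = []
--     for k in range(n + 1):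
--         c_k = 0
--         for j in range(k + 1):
--             c_k += comb(g_n, k - j) * ((-2) ** j)
--         chern.append(c_k)
--     return chern
-- ===== SOURCE B (Python) =====
-- from math import comb
--
-- def chern_classes_type_IV(n):
--     """Chern classes of Q^n via the recurrence c_k = C(n+2,k) - 2*c_{k-1},
--     with the binomial coefficient updated incrementally (O(n) total)."""
--     chern = []
--     prev = 0
--     b = 1  # comb(n + 2, k) maintained incrementally
--     for k in range(n + 1):
--         c = b - 2 * prev
--         chern.append(c)
--         prev = c
--         b = b * (n + 2 - k) // (k + 1)
--     return chern
-- ===== Notes on version B (the rewrite author's own statement) =====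
-- stated objective: faster
-- what changed: Replaces the double loop summing comb(n+2,k-j)*(-2)^j with the one-pass recurrence c_k = comb(n+2,k) - 2*c_{k-1}, maintaining the binomial coefficient incrementally instead of calling comb.
import Mathlib
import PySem

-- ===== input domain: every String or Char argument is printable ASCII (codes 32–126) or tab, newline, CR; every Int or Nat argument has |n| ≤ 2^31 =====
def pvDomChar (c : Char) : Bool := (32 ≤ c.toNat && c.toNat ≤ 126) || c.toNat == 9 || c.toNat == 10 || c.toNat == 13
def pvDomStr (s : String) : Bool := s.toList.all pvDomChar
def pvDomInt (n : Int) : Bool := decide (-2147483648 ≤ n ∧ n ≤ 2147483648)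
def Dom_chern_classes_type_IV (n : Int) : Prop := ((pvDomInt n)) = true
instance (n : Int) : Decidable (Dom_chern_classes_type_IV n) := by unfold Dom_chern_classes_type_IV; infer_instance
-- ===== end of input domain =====

-- B replaces A's double loop by the one-pass recurrence c_k = C(n+2,k) - 2*c_{k-1}
-- with an incrementally updated binomial coefficient (objective: faster).

-- ===== PORT A =====
-- inner loop: c_k = sum_{j=0}^{k} comb(n+2, k-j) * (-2)^j   (comb arguments are
-- nonnegative whenever the loops run, so Nat.choose on .toNat is exact)
def chern_classes_type_IV (n : Int) : List Int :=
  (PySem.List.pyRange 0 (n + 1) 1).foldl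
    (fun chern k =>
      chern ++ [(PySem.List.pyRange 0 (k + 1) 1).foldl
        (fun c j => c + (Nat.choose (n + 2).toNat (k - j).toNat : Int) * (-2) ^ j.toNat) 0])
    []

-- ===== PORT B =====
-- state (chern, prev, b): b = comb(n+2, k) maintained via exact integer division
def chern_classes_type_IV_alt (n : Int) : List Int :=
  ((PySem.List.pyRange 0 (n + 1) 1).foldl
    (fun (st : List Int × Int × Int) k =>
      let c := st.2.2 - 2 * st.2.1
      (st.1 ++ [c], c, PySem.Int.floordiv (st.2.2 * (n + 2 - k)) (k + 1)))
    ([], 0, 1)).1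

-- ===== PRECONDITION & SPEC =====
def Spec_chern_classes_type_IV (n : Int) (out : List Int) : Prop := out = chern_classes_type_IV_alt n
instance (n : Int) (out : List Int) : Decidable (Spec_chern_classes_type_IV n out) := by unfold Spec_chern_classes_type_IV; infer_instance

-- ===== CLAIM (what is proved, stated in full; the proofs are below) =====
def Claim_equal_chern_classes_type_IV : Prop := ∀ (n : Int), Dom_chern_classes_type_IV n → Spec_chern_classes_type_IV n (chern_classes_type_IV n)

-- ===== LEMMAS AND PROOFS =====

/-- Reference value of A's inner sum, over Nat. -/
def pvS (g k : Nat) : Int :=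
  ((List.range (k + 1)).map (fun j => (Nat.choose g (k - j) : Int) * (-2) ^ j)).sum

lemma pvS_zero (g : Nat) : pvS g 0 = 1 := by simp [pvS]

lemma pvS_succ (g k : Nat) : pvS g (k + 1) = (Nat.choose g (k + 1) : Int) - 2 * pvS g k := by
  unfold pvS
  rw [List.range_succ_eq_map]
  simp only [List.map_cons, List.map_map, List.sum_cons, Function.comp_def,
    Nat.succ_eq_add_one]
  have : ((List.range (k + 1)).map
      (fun j => (Nat.choose g (k + 1 - (j + 1)) : Int) * (-2) ^ (j + 1))).sum
      = (-2) * ((List.range (k + 1)).map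
      (fun j => (Nat.choose g (k - j) : Int) * (-2) ^ j)).sum := by
    rw [← List.sum_map_mul_left]
    congr 1
    refine List.map_congr_left ?_
    intro j hj
    have : k + 1 - (j + 1) = k - j := by omega
    rw [this, pow_succ]
    ring
  rw [this]
  simp only [Nat.sub_zero]
  ring

/-- foldl of additions over a list is the sum of its mapped values. -/
lemma pvFoldAdd (h : Int → Int) (l : List Int) (init : Int) :
    l.foldl (fun c j => c + h j) init = init + (l.map h).sum := by
  induction l generalizing init with
  | nil => simp
  | cons x xs ih => simp [List.foldl_cons, ih]; ring

/-- A's inner fold equals pvS, for 0 ≤ n and k : Nat. -/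
lemma pvInnerA (n : Int) (k : Nat) :
    (PySem.List.pyRange 0 ((k : Int) + 1) 1).foldl
      (fun c j => c + (Nat.choose (n + 2).toNat ((k : Int) - j).toNat : Int) * (-2) ^ j.toNat) 0
      = pvS (n + 2).toNat k := by
  rw [pvFoldAdd, PySem.List.pyRange_one]
  unfold pvS
  simp only [sub_zero, List.map_map, zero_add]
  have h1 : ((k : Int) + 1).toNat = k + 1 := by omega
  rw [h1]
  refine congrArg List.sum (List.map_congr_left ?_)
  intro j hj
  have hj' : j < k + 1 := List.mem_range.mp hj
  simp only [Function.comp]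
  have e1 : ((k : Int) - (j : Int)).toNat = k - j := by omega
  rw [e1, Int.toNat_natCast]

/-- A's outer fold produces the map of pvS over range. -/
lemma pvOuterA (n : Int) (hn : 0 ≤ n) (m : Nat) (hm : (m : Int) ≤ n + 1) :
    (PySem.List.pyRange 0 (m : Int) 1).foldl
      (fun chern k =>
        chern ++ [(PySem.List.pyRange 0 (k + 1) 1).foldl
          (fun c j => c + (Nat.choose (n + 2).toNat (k - j).toNat : Int) * (-2) ^ j.toNat) 0])
      []
      = (List.range m).map (fun k => pvS (n + 2).toNat k) := by
  induction m with
  | zero => simp [PySem.List.pyRange_one_eq_nil]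
  | succ m ih =>
    have hm' : (m : Int) ≤ n + 1 := by push_cast at hm ⊢; omega
    have hsplit : PySem.List.pyRange 0 ((m + 1 : Nat) : Int) 1
        = PySem.List.pyRange 0 (m : Int) 1 ++ [(m : Int)] := by
      have : ((m + 1 : Nat) : Int) = (m : Int) + 1 := by push_cast; ring
      rw [this, PySem.List.pyRange_one_succ_right (by positivity)]
    rw [hsplit, List.foldl_append, ih hm', List.range_succ, List.map_append]
    simp only [List.foldl_cons, List.foldl_nil, List.map_cons, List.map_nil]
    rw [pvInnerA n m]

/-- The exact-division binomial update. -/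
lemma pvBinStep (n : Int) (hn : 0 ≤ n) (m : Nat) (hm : (m : Int) ≤ n) :
    PySem.Int.floordiv ((Nat.choose (n + 2).toNat m : Int) * (n + 2 - (m : Int))) ((m : Int) + 1)
      = (Nat.choose (n + 2).toNat (m + 1) : Int) := by
  set g := (n + 2).toNat with hg
  have hgm : (n + 2 - (m : Int)) = ((g - m : Nat) : Int) := by
    have : (g : Int) = n + 2 := by omega
    omega
  have hcast : ((m : Int) + 1) = ((m + 1 : Nat) : Int) := by push_cast; ring
  rw [hgm, hcast, ← Nat.cast_mul, PySem.Int.floordiv_natCast]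
  congr 1
  rw [← Nat.choose_succ_right_eq g m, Nat.mul_div_cancel _ (Nat.succ_pos m)]

/-- B's fold invariant: after processing 0..m-1 the state is
    (map pvS (range m), last value, choose g m). -/
lemma pvInvB (n : Int) (hn : 0 ≤ n) (m : Nat) (hm : (m : Int) ≤ n + 1) :
    (PySem.List.pyRange 0 (m : Int) 1).foldl
      (fun (st : List Int × Int × Int) k =>
        let c := st.2.2 - 2 * st.2.1
        (st.1 ++ [c], c, PySem.Int.floordiv (st.2.2 * (n + 2 - k)) (k + 1)))
      ([], 0, 1)
      = ((List.range m).map (fun k => pvS (n + 2).toNat k),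
         (if m = 0 then 0 else pvS (n + 2).toNat (m - 1)),
         (Nat.choose (n + 2).toNat m : Int)) := by
  induction m with
  | zero => simp [PySem.List.pyRange_one_eq_nil]
  | succ m ih =>
    have hm' : (m : Int) ≤ n + 1 := by push_cast at hm ⊢; omega
    have hmn : (m : Int) ≤ n := by push_cast at hm; omega
    have hsplit : PySem.List.pyRange 0 ((m + 1 : Nat) : Int) 1
        = PySem.List.pyRange 0 (m : Int) 1 ++ [(m : Int)] := by
      have : ((m + 1 : Nat) : Int) = (m : Int) + 1 := by push_cast; ring
      rw [this, PySem.List.pyRange_one_succ_right (by positivity)]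
    rw [hsplit, List.foldl_append, ih hm']
    simp only [List.foldl_cons, List.foldl_nil]
    have hc : ((Nat.choose (n + 2).toNat m : Int)
        - 2 * (if m = 0 then 0 else pvS (n + 2).toNat (m - 1))) = pvS (n + 2).toNat m := by
      rcases Nat.eq_zero_or_pos m with h0 | hpos
      · subst h0
        simp [pvS_zero]
      · obtain ⟨m', rfl⟩ : ∃ m', m = m' + 1 := ⟨m - 1, by omega⟩
        simp only [Nat.succ_ne_zero, if_false, Nat.add_sub_cancel]
        rw [pvS_succ]
    refine Prod.ext ?_ (Prod.ext ?_ ?_) <;> simp only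
    · rw [List.range_succ, List.map_append]
      simp only [List.map_cons, List.map_nil]
      rw [hc]
    · simp only [Nat.succ_ne_zero, if_false, Nat.add_sub_cancel]
      exact hc
    · rw [pvBinStep n hn m hmn]

-- ===== VERDICT (by name: the statement is the Claim_ definition above) =====
theorem chern_classes_type_IV_spec : Claim_equal_chern_classes_type_IV := by
  intro n _
  unfold Spec_chern_classes_type_IV chern_classes_type_IV chern_classes_type_IV_alt
  by_cases hn : 0 ≤ n
  · have hm : n + 1 = ((n + 1).toNat : Int) := by omega
    rw [hm, pvOuterA n hn (n + 1).toNat (by omega), pvInvB n hn (n + 1).toNat (by omega)]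
  · rw [PySem.List.pyRange_one_eq_nil (by omega)]
    simp
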